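-- pv_equiv track=rewrite | github.com/GirZ0n/Lupa-Visualization | src/kotlin_imports/common/utils.py | fq_names_group_by_packages_stats
-- ===== SOURCE A (Python) =====
-- import itertools
-- from typing import Dict, List, Optional, Union
--
-- def get_package(fq_name: str, packages: List[str]) -> str:
--     max_package = ''
--     for package in packages:
--         if fq_name.startswith(package) and len(max_package) < len(package):
--             max_package = package
--     return 'other' if max_package == '' else max_package
--
-- def fq_names_group_by_packages_stats(fq_names: List[str], packages: List[str]) -> Dict[str, int]:
--     fq_name_groups = {
--         group_name: len(list(group_members))
--         for group_name, group_members in itertools.groupby(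
--             sorted(fq_names), lambda fq_name: get_package(fq_name, packages)
--         )
--     }
--     fq_name_groups.pop('other', None)
--     return fq_name_groups
-- ===== SOURCE B (Python) =====
-- def fq_names_group_by_packages_stats(fq_names, packages):
--     # Longest-prefix lookup via a hash set of packages (probe the name's own
--     # prefixes, longest first) + one streaming run-length pass over the sorted
--     # names, instead of scanning every package per name and materialising groups.
--     package_set = set(packages)
--
--     def longest_package(fq_name):
--         for i in range(len(fq_name), 0, -1):
--             if fq_name[:i] in package_set:
--                 return fq_name[:i]
--         return 'other'
--
--     result = {}
--     prev_key = None
--     count = 0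
--     for fq_name in sorted(fq_names):
--         key = longest_package(fq_name)
--         if key == prev_key:
--             count += 1
--         else:
--             if prev_key is not None:
--                 result[prev_key] = count
--             prev_key, count = key, 1
--     if prev_key is not None:
--         result[prev_key] = count
--     result.pop('other', None)
--     return result
-- ===== Notes on version B (the rewrite author's own statement) =====
-- stated objective: faster
-- what changed: B replaces A's per-name scan over all packages (tracking the longest startswith match) by hash-set membership tests on the name's own prefixes, longest first, and replaces sorted+itertools.groupby+dict-comprehension by a single streaming run-length pass with a prev/count accumulator.
import Mathlib
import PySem

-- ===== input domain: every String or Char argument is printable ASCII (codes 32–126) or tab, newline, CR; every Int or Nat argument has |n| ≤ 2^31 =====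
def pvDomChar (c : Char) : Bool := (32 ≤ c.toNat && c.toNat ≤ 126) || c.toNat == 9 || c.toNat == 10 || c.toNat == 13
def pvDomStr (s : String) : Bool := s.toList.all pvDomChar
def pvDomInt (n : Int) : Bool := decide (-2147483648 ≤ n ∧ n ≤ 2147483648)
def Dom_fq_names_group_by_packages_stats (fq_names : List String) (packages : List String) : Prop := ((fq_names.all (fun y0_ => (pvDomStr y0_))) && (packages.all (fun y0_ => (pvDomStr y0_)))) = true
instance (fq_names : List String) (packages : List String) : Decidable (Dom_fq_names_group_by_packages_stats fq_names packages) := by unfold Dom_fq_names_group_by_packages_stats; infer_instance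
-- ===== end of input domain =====

-- B: hash-set longest-prefix probing of the name's own prefixes + one streaming run-length
-- pass over the sorted names, replacing A's per-name scan of all packages and groupby; faster.


-- ===== PORT A =====
-- helper get_package: scan every package, keep the longest startswith match
def get_package (fq_name : String) (packages : List String) : String :=
  let max_package := packages.foldl
    (fun max_package package =>
      if PySem.Str.startswith fq_name package && decide (PySem.Str.len max_package < PySem.Str.len package)
      then package else max_package) ""
  if max_package = "" then "other" else max_package

-- itertools.groupby(l, key) with len(list(…)) of each group: consecutive runs of equal key
def groupbyCounts (key : String → String) : List String → List (String × Int)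
  | [] => []
  | x :: xs =>
    let k := key x
    (k, 1 + (xs.takeWhile (fun y => key y == k)).length) ::
      groupbyCounts key (xs.dropWhile (fun y => key y == k))
termination_by l => l.length
decreasing_by
  simp only [List.length_cons]
  exact Nat.lt_succ_of_le (List.length_dropWhile_le _ _)

def fq_names_group_by_packages_stats (fq_names : List String) (packages : List String) : List (String × Int) :=
  let fq_name_groups :=
    (groupbyCounts (fun fq_name => get_package fq_name packages)
        (PySem.List.sorted fq_names (fun x => x))).foldl
      (fun d gc => d.insert gc.1 gc.2) PySem.Dict.empty
  (fq_name_groups.erase "other").items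

-- ===== PORT B =====
-- longest_package: probe fq_name[:i] for i = len .. 1 against the package hash set
def longestPackageGo (package_set : PySem.Set String) (fq_name : String) : Nat → String
  | 0 => "other"
  | i + 1 =>
    let p := PySem.Str.slice fq_name none (some ((i + 1 : Nat) : Int))
    if PySem.Set.contains package_set p then p else longestPackageGo package_set fq_name i

def longestPackage (package_set : PySem.Set String) (fq_name : String) : String :=
  longestPackageGo package_set fq_name fq_name.toList.length

-- one streaming pass: state (result dict, prev_key, count)
def bStep (package_set : PySem.Set String)
    (st : PySem.Dict String Int × Option String × Int) (fq_name : String) :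
    PySem.Dict String Int × Option String × Int :=
  let key := longestPackage package_set fq_name
  match st with
  | (result, prev_key, count) =>
    if prev_key == some key then (result, prev_key, count + 1)
    else
      match prev_key with
      | none => (result, some key, 1)
      | some p => (result.insert p count, some key, 1)

def fq_names_group_by_packages_stats_alt (fq_names : List String) (packages : List String) : List (String × Int) :=
  let package_set := PySem.Set.ofList packages
  let st := (PySem.List.sorted fq_names (fun x => x)).foldl (bStep package_set)
    (PySem.Dict.empty, none, 0)
  let result := match st.2.1 with
    | none => st.1
    | some p => st.1.insert p st.2.2
  (result.erase "other").items

-- ===== PRECONDITION & SPEC =====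
def Spec_fq_names_group_by_packages_stats (fq_names : List String) (packages : List String) (out : List (String × Int)) : Prop := out = fq_names_group_by_packages_stats_alt fq_names packages
instance (fq_names : List String) (packages : List String) (out : List (String × Int)) : Decidable (Spec_fq_names_group_by_packages_stats fq_names packages out) := by unfold Spec_fq_names_group_by_packages_stats; infer_instance

-- ===== CLAIM (what is proved, stated in full; the proofs are below) =====
def Claim_equal_fq_names_group_by_packages_stats : Prop := ∀ (fq_names : List String) (packages : List String), Dom_fq_names_group_by_packages_stats fq_names packages → Spec_fq_names_group_by_packages_stats fq_names packages (fq_names_group_by_packages_stats fq_names packages)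

-- ===== LEMMAS AND PROOFS =====

-- the length of the longest package that is a prefix of the name (0 if none)
def bestLen (fq_name : String) (packages : List String) : Nat :=
  ((packages.filter (fun p => decide (p.toList <+: fq_name.toList))).map
    (fun p => p.toList.length)).foldr max 0

theorem foldr_max_le {l : List Nat} {i : Nat} (h : ∀ a ∈ l, a ≤ i) : l.foldr max 0 ≤ i := by
  induction l with
  | nil => simp
  | cons a l ih =>
    simp only [List.foldr_cons, max_le_iff]
    exact ⟨h a (by simp), ih (fun b hb => h b (List.mem_cons_of_mem _ hb))⟩

theorem le_foldr_max {l : List Nat} {a : Nat} (h : a ∈ l) : a ≤ l.foldr max 0 := by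
  induction l with
  | nil => cases h
  | cons b l ih =>
    rcases List.mem_cons.1 h with rfl | h'
    · exact le_max_left _ _
    · exact le_trans (ih h') (le_max_right _ _)

theorem foldr_max_mem {l : List Nat} : l.foldr max 0 = 0 ∨ l.foldr max 0 ∈ l := by
  induction l with
  | nil => exact Or.inl rfl
  | cons a l ih =>
    simp only [List.foldr_cons]
    rcases Nat.le_total a (l.foldr max 0) with h | h
    · rw [max_eq_right h]
      rcases ih with h0 | hm
      · exact Or.inl h0
      · exact Or.inr (List.mem_cons_of_mem _ hm)
    · rw [max_eq_left h]
      exact Or.inr (List.mem_cons_self)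

theorem bestLen_le (fq_name : String) (packages : List String) :
    bestLen fq_name packages ≤ fq_name.toList.length := by
  apply foldr_max_le
  intro a ha
  simp only [List.mem_map, List.mem_filter, decide_eq_true_eq] at ha
  obtain ⟨p, ⟨_, hpre⟩, rfl⟩ := ha
  exact hpre.length_le

theorem bestLen_attained {fq_name : String} {packages : List String}
    (h : bestLen fq_name packages ≠ 0) :
    ∃ p ∈ packages, p.toList <+: fq_name.toList ∧ p.toList.length = bestLen fq_name packages := by
  rcases foldr_max_mem (l := ((packages.filter (fun p => decide (p.toList <+: fq_name.toList))).map (fun p => p.toList.length))) with h0 | hm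
  · exact absurd h0 h
  · simp only [List.mem_map, List.mem_filter, decide_eq_true_eq] at hm
    obtain ⟨p, ⟨hp, hpre⟩, hlen⟩ := hm
    exact ⟨p, hp, hpre, hlen⟩

theorem le_bestLen {fq_name : String} {packages : List String} {p : String}
    (hp : p ∈ packages) (hpre : p.toList <+: fq_name.toList) :
    p.toList.length ≤ bestLen fq_name packages := by
  apply le_foldr_max
  simp only [List.mem_map, List.mem_filter, decide_eq_true_eq]
  exact ⟨p, ⟨hp, hpre⟩, rfl⟩

theorem slice_take (s : String) (n : Nat) :
    PySem.Str.slice s none (some (n : Int)) = String.ofList (s.toList.take n) := by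
  simp [PySem.Str.slice, PySem.List.slice_to]

-- a prefix of the name is determined by its length
theorem prefix_eq_take {p s : List Char} (h : p <+: s) : p = s.take p.length :=
  List.prefix_iff_eq_take.1 h

theorem bestLen_cons (fq_name p : String) (ps : List String) :
    bestLen fq_name (p :: ps) =
      if p.toList <+: fq_name.toList then max p.toList.length (bestLen fq_name ps)
      else bestLen fq_name ps := by
  simp only [bestLen, List.filter_cons]
  split
  · next h => simp only [decide_eq_true_eq] at h; rw [if_pos h]; simp
  · next h => simp only [decide_eq_true_eq] at h; rw [if_neg h]

-- characterisation of A's fold in get_package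
theorem get_package_fold_spec (fq_name : String) :
    ∀ (ps : List String) (m : String), m.toList <+: fq_name.toList →
      (ps.foldl
        (fun max_package package =>
          if PySem.Str.startswith fq_name package && decide (PySem.Str.len max_package < PySem.Str.len package)
          then package else max_package) m).toList <+: fq_name.toList ∧
      (ps.foldl
        (fun max_package package =>
          if PySem.Str.startswith fq_name package && decide (PySem.Str.len max_package < PySem.Str.len package)
          then package else max_package) m).toList.length = max m.toList.length (bestLen fq_name ps) := by
  intro ps
  induction ps with
  | nil => intro m hm; simpa [bestLen] using hm
  | cons p ps ih =>
    intro m hm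
    simp only [List.foldl_cons]
    have hcond : (PySem.Str.startswith fq_name p && decide (PySem.Str.len m < PySem.Str.len p)) = true ↔
        (p.toList <+: fq_name.toList) ∧ (m.toList.length < p.toList.length) := by
      simp [PySem.Str.startswith_eq, PySem.Chars.startswith_iff]
    rw [bestLen_cons]
    by_cases hpre : p.toList <+: fq_name.toList
    · by_cases hlt : m.toList.length < p.toList.length
      · rw [if_pos (hcond.2 ⟨hpre, hlt⟩)]
        obtain ⟨h1, h2⟩ := ih p hpre
        refine ⟨h1, ?_⟩
        rw [h2, if_pos hpre]
        omega
      · rw [if_neg (fun h => hlt (hcond.1 h).2)]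
        obtain ⟨h1, h2⟩ := ih m hm
        refine ⟨h1, ?_⟩
        rw [h2, if_pos hpre]
        omega
    · rw [if_neg (fun h => hpre (hcond.1 h).1)]
      obtain ⟨h1, h2⟩ := ih m hm
      refine ⟨h1, ?_⟩
      rw [h2, if_neg hpre]

theorem get_package_eq (fq_name : String) (packages : List String) :
    get_package fq_name packages =
      if bestLen fq_name packages = 0 then "other"
      else String.ofList (fq_name.toList.take (bestLen fq_name packages)) := by
  unfold get_package
  obtain ⟨hpre, hlen⟩ := get_package_fold_spec fq_name packages "" (by simp)
  set r := packages.foldl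
    (fun max_package package =>
      if PySem.Str.startswith fq_name package && decide (PySem.Str.len max_package < PySem.Str.len package)
      then package else max_package) "" with hr
  have hlen' : r.toList.length = bestLen fq_name packages := by
    simpa using hlen
  by_cases h0 : bestLen fq_name packages = 0
  · rw [if_pos h0]
    have : r.toList = [] := List.length_eq_zero_iff.1 (by omega)
    have hre : r = "" := String.toList_inj.mp (by simp [this])
    simp [hre]
  · rw [if_neg h0]
    have hne : r ≠ "" := by
      intro hre
      rw [hre] at hlen'
      simp at hlen'
      omega
    simp only [if_neg hne]
    have := prefix_eq_take hpre
    rw [hlen'] at this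
    calc r = String.ofList r.toList := String.ofList_toList.symm
    _ = String.ofList (fq_name.toList.take (bestLen fq_name packages)) := by rw [← this]

theorem longestPackageGo_spec (fq_name : String) (packages : List String) :
    ∀ i : Nat, i ≤ fq_name.toList.length → bestLen fq_name packages ≤ i →
      longestPackageGo (PySem.Set.ofList packages) fq_name i =
        if bestLen fq_name packages = 0 then "other"
        else String.ofList (fq_name.toList.take (bestLen fq_name packages)) := by
  intro i
  induction i with
  | zero =>
    intro _ hb
    have h0 : bestLen fq_name packages = 0 := Nat.le_zero.1 hb
    simp [longestPackageGo, h0]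
  | succ i ih =>
    intro hiL hb
    unfold longestPackageGo
    have hslice := slice_take fq_name (i + 1)
    by_cases hmem : String.ofList (fq_name.toList.take (i + 1)) ∈ packages
    · have hcont : PySem.Set.contains (PySem.Set.ofList packages)
          (PySem.Str.slice fq_name none (some ((i + 1 : Nat) : Int))) = true := by
        rw [hslice]
        exact (PySem.Set.contains_iff _ _).2 ((PySem.Set.mem_ofList _ _).2 hmem)
      simp only [hcont, if_true]
      have hprefix : (String.ofList (fq_name.toList.take (i + 1))).toList <+: fq_name.toList := by
        simp only [String.toList_ofList]
        exact List.take_prefix _ _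
      have hlen : (String.ofList (fq_name.toList.take (i + 1))).toList.length = i + 1 := by
        simp only [String.toList_ofList, List.length_take]
        omega
      have hle : i + 1 ≤ bestLen fq_name packages := by
        have := le_bestLen hmem hprefix
        omega
      have hbe : bestLen fq_name packages = i + 1 := by omega
      rw [hslice, if_neg (by omega), hbe]
    · have hcont : PySem.Set.contains (PySem.Set.ofList packages)
          (PySem.Str.slice fq_name none (some ((i + 1 : Nat) : Int))) = false := by
        rw [hslice, ← Bool.not_eq_true]
        intro h
        exact hmem ((PySem.Set.mem_ofList _ _).1 ((PySem.Set.contains_iff _ _).1 h))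
      simp only [hcont, Bool.false_eq_true, if_false]
      apply ih (by omega)
      -- bestLen ≠ i + 1, else the attained longest package would be exactly this absent prefix
      rcases Nat.lt_or_ge (bestLen fq_name packages) (i + 1) with h | h
      · omega
      · exfalso
        have hbe : bestLen fq_name packages = i + 1 := by omega
        obtain ⟨p, hp, hpre2, hplen⟩ := bestLen_attained (fq_name := fq_name) (packages := packages) (by omega)
        have hpl : p.toList = fq_name.toList.take (i + 1) := by
          have h2 := prefix_eq_take hpre2
          rw [hplen, hbe] at h2
          exact h2
        have : p = String.ofList (fq_name.toList.take (i + 1)) := by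
          rw [← hpl, String.ofList_toList]
        exact hmem (this ▸ hp)

theorem longestPackage_eq (fq_name : String) (packages : List String) :
    longestPackage (PySem.Set.ofList packages) fq_name =
      if bestLen fq_name packages = 0 then "other"
      else String.ofList (fq_name.toList.take (bestLen fq_name packages)) :=
  longestPackageGo_spec fq_name packages _ le_rfl (bestLen_le fq_name packages)

theorem key_eq (packages : List String) (fq_name : String) :
    longestPackage (PySem.Set.ofList packages) fq_name = get_package fq_name packages := by
  rw [get_package_eq, longestPackage_eq]

-- B's step, abstracted over an arbitrary key function
def stepK (key : String → String)
    (st : PySem.Dict String Int × Option String × Int) (fq_name : String) :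
    PySem.Dict String Int × Option String × Int :=
  let k := key fq_name
  match st with
  | (result, prev_key, count) =>
    if prev_key == some k then (result, prev_key, count + 1)
    else
      match prev_key with
      | none => (result, some k, 1)
      | some p => (result.insert p count, some k, 1)

def flushK (st : PySem.Dict String Int × Option String × Int) : PySem.Dict String Int :=
  match st.2.1 with
  | none => st.1
  | some p => st.1.insert p st.2.2

theorem bStep_eq_stepK (package_set : PySem.Set String) :
    bStep package_set = stepK (longestPackage package_set) := rfl

-- processing a run of elements whose key equals the pending key just increments the count
theorem stepK_run (key : String → String) (k : String) :
    ∀ (l : List String), (∀ y ∈ l, key y = k) →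
      ∀ (d : PySem.Dict String Int) (c : Int),
        l.foldl (stepK key) (d, some k, c) = (d, some k, c + l.length) := by
  intro l
  induction l with
  | nil => intro _ d c; simp
  | cons y l ih =>
    intro h d c
    have hk : key y = k := h y (List.mem_cons_self)
    simp only [List.foldl_cons, stepK, hk, beq_self_eq_true, if_true]
    rw [ih (fun z hz => h z (List.mem_cons_of_mem _ hz)) d (c + 1)]
    simp only [List.length_cons]
    congr 2
    push_cast
    ring

-- main grouping lemma: a pending (key, count) pair, then the rest of the stream
theorem streamP (key : String → String) :
    ∀ (l : List String) (d : PySem.Dict String Int) (k : String) (c : Int),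
      flushK (l.foldl (stepK key) (d, some k, c)) =
        (groupbyCounts key (l.dropWhile (fun y => key y == k))).foldl
          (fun d gc => d.insert gc.1 gc.2)
          (d.insert k (c + (l.takeWhile (fun y => key y == k)).length)) := by
  intro l d k c
  have hsplit : l = l.takeWhile (fun y => key y == k) ++ l.dropWhile (fun y => key y == k) :=
    (List.takeWhile_append_dropWhile).symm
  rw [hsplit, List.foldl_append, List.takeWhile_append_dropWhile]
  rw [stepK_run key k _ (fun y hy => by simpa using List.mem_takeWhile_imp hy) d c]
  cases hrest : l.dropWhile (fun y => key y == k) with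
  | nil => simp [flushK, groupbyCounts]
  | cons y ys =>
    have hky : (key y == k) = false := by
      have := List.head?_dropWhile_not (fun y => key y == k) l
      rw [hrest] at this
      exact this
    have hne : (some k == some (key y)) = false := by
      simp only [beq_eq_false_iff_ne] at hky ⊢
      exact fun h => hky (by simpa using h.symm)
    simp only [List.foldl_cons, stepK, hne, Bool.false_eq_true, if_false]
    rw [streamP key ys (d.insert k (c + (l.takeWhile (fun y => key y == k)).length)) (key y) 1]
    conv_rhs => rw [groupbyCounts]
    simp only [List.foldl_cons]
termination_by l => l.length
decreasing_by
  have h1 : (l.dropWhile (fun y => key y == k)).length ≤ l.length :=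
    List.length_dropWhile_le _ _
  rw [hrest] at h1
  simp only [List.length_cons] at h1
  omega

theorem stream_top (key : String → String) (l : List String) :
    flushK (l.foldl (stepK key) (PySem.Dict.empty, none, 0)) =
      (groupbyCounts key l).foldl (fun d gc => d.insert gc.1 gc.2) PySem.Dict.empty := by
  cases l with
  | nil => simp only [List.foldl_nil, groupbyCounts]; rfl
  | cons y ys =>
    have hnone : ((none : Option String) == some (key y)) = false := rfl
    simp only [List.foldl_cons, stepK, hnone, Bool.false_eq_true, if_false]
    rw [streamP key ys PySem.Dict.empty (key y) 1]
    conv_rhs => rw [groupbyCounts]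
    simp only [List.foldl_cons]

-- ===== VERDICT (by name: the statement is the Claim_ definition above) =====
theorem fq_names_group_by_packages_stats_spec : Claim_equal_fq_names_group_by_packages_stats := by
  intro fq_names packages _
  unfold Spec_fq_names_group_by_packages_stats
  unfold fq_names_group_by_packages_stats fq_names_group_by_packages_stats_alt
  simp only [bStep_eq_stepK]
  have hkey : longestPackage (PySem.Set.ofList packages) = fun n => get_package n packages :=
    funext (key_eq packages)
  rw [hkey, ← stream_top]
  rfl
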